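-- pv_equiv track=rewrite | github.com/pypi-data/pypi-mirror-92 | packages/starfishX/starfishX-0.155529.tar.gz/starfishX-0.155529/starfishX/starfishXfn.py | crateQueryString
-- ===== SOURCE A (Python) =====
-- def crateQueryString(symbol,Volume=False,OHLC=False):
--     QueryString = ""
--     r = 0
--     for i in symbol:
--         if(Volume==False):
--           if(OHLC==False):
--             QueryString += i+".bk:"+"Close"
--           elif(OHLC==True):
--             QueryString += i+".bk:"+"Open,"+i+".bk:"+"High,"+i+".bk:"+"Low,"+i+".bk:"+"Close"
--         if(Volume==True):
--           if(OHLC==False):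
--             QueryString += i+".bk:"+"Close,"+i+".bk:Volume"
--           elif(OHLC==True):
--             QueryString += i+".bk:"+"Open,"+i+".bk:"+"High,"+i+".bk:"+"Low,"+i+".bk:"+"Close,"+i+".bk:"+"Volume"
--
--         if(r<len(symbol)-1):
--           QueryString += ","
--         r+=1
--     return QueryString
-- ===== SOURCE B (Python) =====
-- def crateQueryString(symbol, Volume=False, OHLC=False):
--     fields = ["Open", "High", "Low", "Close"] if OHLC == True else ["Close"]
--     if Volume == True:
--         fields = fields + ["Volume"]
--     segments = [",".join(i + ".bk:" + f for f in fields) for i in symbol]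
--     return ",".join(segments)
-- ===== Notes on version B (the rewrite author's own statement) =====
-- stated objective: simpler
-- what changed: Hoists the flag branching out of the loop into a precomputed field list, builds per-symbol segments with join and joins them, replacing the counter-based trailing-comma logic of the single accumulating pass.
import Mathlib
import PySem

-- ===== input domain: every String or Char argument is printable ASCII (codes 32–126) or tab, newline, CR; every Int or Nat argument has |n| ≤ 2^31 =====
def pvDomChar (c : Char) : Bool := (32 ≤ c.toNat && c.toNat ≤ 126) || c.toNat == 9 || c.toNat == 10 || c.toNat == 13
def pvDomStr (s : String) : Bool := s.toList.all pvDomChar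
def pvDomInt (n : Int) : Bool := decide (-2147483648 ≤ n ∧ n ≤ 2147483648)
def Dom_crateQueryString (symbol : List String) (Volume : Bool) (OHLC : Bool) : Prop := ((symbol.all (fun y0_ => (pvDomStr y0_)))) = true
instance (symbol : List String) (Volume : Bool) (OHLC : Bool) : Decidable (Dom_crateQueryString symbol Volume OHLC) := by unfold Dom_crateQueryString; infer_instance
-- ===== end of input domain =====

-- B hoists the flag branching out of the loop into a precomputed field list and uses join,
-- replacing A's counter-based trailing-comma accumulation; objective: simpler (same cost).

-- ===== PORT A =====
-- A's loop body (the Volume/OHLC if-cascade that extends QueryString for one symbol i)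
-- (strings are carried as List Char, per the PySem convention; String.ofList at the boundary)
def crateQueryStringBody (Volume OHLC : Bool) (acc i : List Char) : List Char :=
  let acc := if Volume == false then
      (if OHLC == false then acc ++ i ++ ".bk:".toList ++ "Close".toList
       else if OHLC == true then
         acc ++ i ++ ".bk:".toList ++ "Open,".toList ++ i ++ ".bk:".toList ++ "High,".toList
             ++ i ++ ".bk:".toList ++ "Low,".toList ++ i ++ ".bk:".toList ++ "Close".toList
       else acc)
    else acc
  let acc := if Volume == true then
      (if OHLC == false then acc ++ i ++ ".bk:".toList ++ "Close,".toList ++ i ++ ".bk:Volume".toList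
       else if OHLC == true then
         acc ++ i ++ ".bk:".toList ++ "Open,".toList ++ i ++ ".bk:".toList ++ "High,".toList
             ++ i ++ ".bk:".toList ++ "Low,".toList ++ i ++ ".bk:".toList ++ "Close,".toList
             ++ i ++ ".bk:".toList ++ "Volume".toList
       else acc)
    else acc
  acc

-- A's for-loop: state is the accumulated string and the counter r; n = len(symbol) is fixed.
def crateQueryStringGo (Volume OHLC : Bool) (n : Nat) :
    List (List Char) → List Char → Nat → List Char
  | [], acc, _ => acc
  | i :: rest, acc, r =>
    let acc := crateQueryStringBody Volume OHLC acc i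
    let acc := if r < n - 1 then acc ++ ",".toList else acc
    crateQueryStringGo Volume OHLC n rest acc (r + 1)

def crateQueryString (symbol : List String) (Volume : Bool) (OHLC : Bool) : String :=
  String.ofList (crateQueryStringGo Volume OHLC symbol.length (symbol.map String.toList) [] 0)

-- ===== PORT B =====
-- one per-symbol segment: ",".join(i + ".bk:" + f for f in fields)
def crateQuerySeg (fields : List (List Char)) (i : List Char) : List Char :=
  PySem.Chars.join ",".toList (fields.map (fun f => i ++ ".bk:".toList ++ f))

def crateQueryString_alt (symbol : List String) (Volume : Bool) (OHLC : Bool) : String :=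
  let fields := if OHLC then ["Open".toList, "High".toList, "Low".toList, "Close".toList]
                else ["Close".toList]
  let fields := if Volume then fields ++ ["Volume".toList] else fields
  String.ofList (PySem.Chars.join ",".toList
    ((symbol.map String.toList).map (crateQuerySeg fields)))

-- ===== PRECONDITION & SPEC =====
def Spec_crateQueryString (symbol : List String) (Volume : Bool) (OHLC : Bool) (out : String) : Prop := out = crateQueryString_alt symbol Volume OHLC
instance (symbol : List String) (Volume : Bool) (OHLC : Bool) (out : String) : Decidable (Spec_crateQueryString symbol Volume OHLC out) := by unfold Spec_crateQueryString; infer_instance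

-- ===== CLAIM (what is proved, stated in full; the proofs are below) =====
def Claim_equal_crateQueryString : Prop := ∀ (symbol : List String) (Volume : Bool) (OHLC : Bool), Dom_crateQueryString symbol Volume OHLC → Spec_crateQueryString symbol Volume OHLC (crateQueryString symbol Volume OHLC)

-- ===== LEMMAS AND PROOFS =====
-- the fields B computes for a given flag pair
def crateQueryFields (Volume OHLC : Bool) : List (List Char) :=
  (if Volume then (· ++ ["Volume".toList]) else id)
    (if OHLC then ["Open".toList, "High".toList, "Low".toList, "Close".toList] else ["Close".toList])

-- the string A's loop body appends for symbol i equals B's segment for i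
theorem crateQuery_body_eq (Volume OHLC : Bool) (acc i : List Char) :
    crateQueryStringBody Volume OHLC acc i =
      acc ++ crateQuerySeg (crateQueryFields Volume OHLC) i := by
  cases Volume <;> cases OHLC <;>
    simp [crateQueryStringBody, crateQuerySeg, crateQueryFields,
      PySem.Chars.join_cons_cons, PySem.Chars.join_singleton, List.append_assoc]

-- loop invariant: with n = r + (length of the rest), the loop appends the join of the rest's segments
theorem crateQueryGo_eq (Volume OHLC : Bool) :
    ∀ (l : List (List Char)) (acc : List Char) (r : Nat),
      crateQueryStringGo Volume OHLC (r + l.length) l acc r =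
        acc ++ PySem.Chars.join ",".toList (l.map (crateQuerySeg (crateQueryFields Volume OHLC))) := by
  intro l
  induction l with
  | nil => intro acc r; simp [crateQueryStringGo, PySem.Chars.join_nil]
  | cons i rest ih =>
    intro acc r
    rw [crateQueryStringGo, crateQuery_body_eq Volume OHLC acc i]
    cases rest with
    | nil =>
      simp [crateQueryStringGo, PySem.Chars.join_singleton]
    | cons j rs =>
      have hlt : r < r + (i :: j :: rs).length - 1 := by simp only [List.length_cons]; omega
      rw [if_pos hlt]
      have hn : r + (i :: j :: rs).length = (r + 1) + (j :: rs).length := by simp only [List.length_cons]; omega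
      rw [hn, ih (acc ++ crateQuerySeg (crateQueryFields Volume OHLC) i ++ ",".toList) (r + 1)]
      simp [PySem.Chars.join_cons_cons, List.append_assoc]

theorem crateQueryString_eq_alt (symbol : List String) (Volume OHLC : Bool) :
    crateQueryString symbol Volume OHLC = crateQueryString_alt symbol Volume OHLC := by
  unfold crateQueryString crateQueryString_alt
  have h := crateQueryGo_eq Volume OHLC (symbol.map String.toList) [] 0
  simp only [List.length_map, Nat.zero_add] at h
  rw [h]
  cases Volume <;> cases OHLC <;> simp [crateQueryFields]

-- ===== VERDICT (by name: the statement is the Claim_ definition above) =====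
theorem crateQueryString_spec : Claim_equal_crateQueryString := by
  intro symbol Volume OHLC _
  unfold Spec_crateQueryString
  exact crateQueryString_eq_alt symbol Volume OHLC
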